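-- pv_equiv track=rewrite | github.com/skywalker023/pragmatic-consistency | tasks/teachers.py | _split_persona_and_context
-- ===== SOURCE A (Python) =====
-- def _split_persona_and_context(text, eval_type='convai2'):
--     if 'your persona:' not in text:
--         return None, text
--     else:
--         if eval_type == 'convai2':
--             texts = text.split('\n')
--             return '\n'.join(texts[:-1]), texts[-1]
--         elif eval_type =='dnli':
--             texts = text.split('\n')
--             last_idx = 0
--             for idx, text in enumerate(texts):
--                 if 'your persona:' in text:
--                     last_idx = idx
--             persona_texts = texts[:last_idx+1]
--             context_texts = texts[last_idx+1:]
--             return '\n'.join(persona_texts), '\n'.join(context_texts)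
-- ===== SOURCE B (Python) =====
-- def _split_persona_and_context(text, eval_type='convai2'):
--     if 'your persona:' not in text:
--         return None, text
--     if eval_type == 'convai2':
--         nl = text.rfind('\n')
--         empty_side = ('', text)
--     else:  # 'dnli'
--         nl = text.find('\n', text.rfind('your persona:'))
--         empty_side = (text, '')
--     if nl == -1:
--         return empty_side
--     return text[:nl], text[nl + 1:]
-- ===== Notes on version B (the rewrite author's own statement) =====
-- stated objective: idiomatic
-- what changed: B never builds the line list: it locates the split point directly with rfind/find on string offsets (last newline for convai2; first newline after the last 'your persona:' occurrence for dnli) and slices the text once, instead of splitting into lines, scanning them with an indexed loop and re-joining.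
-- outside the precondition, e.g. on _split_persona_and_context('your persona: a', 'other'): A returns None, B returns ('your persona: a', '')
import Mathlib
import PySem

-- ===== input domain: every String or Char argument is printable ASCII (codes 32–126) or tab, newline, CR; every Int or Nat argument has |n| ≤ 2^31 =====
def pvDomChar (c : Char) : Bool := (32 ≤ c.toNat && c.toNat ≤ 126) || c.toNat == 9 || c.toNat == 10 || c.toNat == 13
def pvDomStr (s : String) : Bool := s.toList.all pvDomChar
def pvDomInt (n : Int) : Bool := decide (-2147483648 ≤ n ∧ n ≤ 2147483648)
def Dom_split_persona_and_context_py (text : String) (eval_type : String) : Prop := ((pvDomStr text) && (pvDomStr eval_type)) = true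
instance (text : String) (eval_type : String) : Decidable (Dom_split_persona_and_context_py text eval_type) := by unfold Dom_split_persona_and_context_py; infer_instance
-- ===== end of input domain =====

-- B locates the split point directly with rfind/find on string offsets and slices the text once,
-- instead of splitting into a line list, scanning it with an indexed loop and re-joining (objective: idiomatic).

-- ===== PORT A =====
def split_persona_and_context_py (text : String) (eval_type : String) : Option String × String :=
  if PySem.Str.isIn "your persona:" text = false then
    (none, text)
  else
    if eval_type = "convai2" then
      let texts := (PySem.Str.split? text "\n").getD []           -- sep ≠ "" so split? is never none
      (some (PySem.Str.join "\n" (PySem.List.slice texts none (some (-1)))),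
       (PySem.List.pyGet? texts (-1)).getD "")                    -- texts ≠ [] so pyGet? is never none
    else if eval_type = "dnli" then
      let texts := (PySem.Str.split? text "\n").getD []           -- sep ≠ "" so split? is never none
      let last_idx : Int :=
        (PySem.List.enumerate texts 0).foldl
          (fun acc p => if PySem.Str.isIn "your persona:" p.2 then p.1 else acc) 0
      (some (PySem.Str.join "\n" (PySem.List.slice texts none (some (last_idx + 1)))),
       PySem.Str.join "\n" (PySem.List.slice texts (some (last_idx + 1)) none))
    else
      (none, text)  -- Python falls off the function and returns bare None (no pair); excluded by Pre_

-- ===== PORT B =====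
def split_persona_and_context_py_alt (text : String) (eval_type : String) : Option String × String :=
  if PySem.Str.isIn "your persona:" text = false then
    (none, text)
  else
    let nes :=
      if eval_type = "convai2" then
        (PySem.Str.rfind text "\n", ((some "" : Option String), text))
      else
        (PySem.Str.findFrom text "\n" (PySem.Str.rfind text "your persona:"), (some text, ""))
    if nes.1 = -1 then nes.2
    else (some (PySem.Str.slice text none (some nes.1)), PySem.Str.slice text (some (nes.1 + 1)) none)

-- ===== PRECONDITION & SPEC =====
-- Pre_ excludes inputs where 'your persona:' occurs in text but eval_type is neither 'convai2' nor
-- 'dnli': there Python A falls off the function and returns bare None, not a (persona, context) pair.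
def Pre_split_persona_and_context_py (text : String) (eval_type : String) : Prop :=
  PySem.Str.isIn "your persona:" text = false ∨ eval_type = "convai2" ∨ eval_type = "dnli"
instance (text : String) (eval_type : String) : Decidable (Pre_split_persona_and_context_py text eval_type) := by unfold Pre_split_persona_and_context_py; infer_instance
def pvWitness_split_persona_and_context_py : String × String :=
  ("your persona: i like tea\nhello there", "convai2")
def Spec_split_persona_and_context_py (text : String) (eval_type : String) (out : Option String × String) : Prop := out = split_persona_and_context_py_alt text eval_type
instance (text : String) (eval_type : String) (out : Option String × String) : Decidable (Spec_split_persona_and_context_py text eval_type out) := by unfold Spec_split_persona_and_context_py; infer_instance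

-- ===== CLAIM (what is proved, stated in full; the proofs are below) =====
def Claim_equal_split_persona_and_context_py : Prop := ∀ (text : String) (eval_type : String), Dom_split_persona_and_context_py text eval_type → Pre_split_persona_and_context_py text eval_type → Spec_split_persona_and_context_py text eval_type (split_persona_and_context_py text eval_type)

-- ===== LEMMAS AND PROOFS =====

theorem pv_single_prefix {α : Type} {a : α} {l : List α} : [a] <+: l ↔ l[0]? = some a := by
  cases l <;> simp [List.cons_prefix_cons, eq_comm]

theorem pv_single_prefix_drop {α : Type} {a : α} {l : List α} {i : Nat} :
    [a] <+: l.drop i ↔ l[i]? = some a := by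
  rw [pv_single_prefix, List.getElem?_drop]; simp

theorem pv_go_splitOn : ∀ (fuel : Nat) (l cur : List Char) (acc : List (List Char)),
    l.length < fuel →
    PySem.Chars.splitOn.go ['\n'] fuel l cur acc
      = acc.reverse ++ (l.splitOn '\n').modifyHead (cur.reverse ++ ·) := by
  intro fuel
  induction fuel with
  | zero => intro l cur acc h; omega
  | succ f ih =>
    intro l cur acc h
    match l with
    | [] =>
      simp [PySem.Chars.splitOn.go, List.splitOn, List.splitOnP, List.splitOnP.go]
    | c :: rest =>
      rw [show PySem.Chars.splitOn.go ['\n'] (f+1) (c :: rest) cur acc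
            = if ['\n'].isPrefixOf (c :: rest) then
                PySem.Chars.splitOn.go ['\n'] f (List.drop 1 (c :: rest)) [] (cur.reverse :: acc)
              else PySem.Chars.splitOn.go ['\n'] f rest (c :: cur) acc from rfl]
      by_cases hc : c = '\n'
      · subst hc
        rw [if_pos (by simp)]
        rw [ih _ _ _ (by simpa using h)]
        simp only [List.drop_succ_cons, List.drop_zero]
        show _ = acc.reverse ++ (List.splitOnP (· == '\n') ('\n' :: rest)).modifyHead _
        rw [List.splitOnP_cons]
        obtain ⟨h0, t0, ht⟩ := List.exists_cons_of_ne_nil (List.splitOnP_ne_nil (· == '\n') rest)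
        rw [if_pos (by simp), show List.splitOn '\n' rest = List.splitOnP (· == '\n') rest from rfl, ht]
        simp
      · have : ['\n'].isPrefixOf (c :: rest) = false := by
          simp [List.isPrefixOf]; exact fun hh => (hc hh.symm).elim
        rw [this, if_neg (by simp)]
        rw [ih _ _ _ (by simpa using h)]
        show _ = acc.reverse ++ (List.splitOnP (· == '\n') (c :: rest)).modifyHead _
        rw [List.splitOnP_cons]
        have hpne := List.splitOnP_ne_nil (· == '\n') rest
        obtain ⟨h0, t0, ht⟩ := List.exists_cons_of_ne_nil hpne
        rw [if_neg (by simp [hc])]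
        show acc.reverse ++ (List.splitOnP (· == '\n') rest).modifyHead ((c :: cur).reverse ++ ·) = _
        rw [ht]
        simp

theorem pv_chars_splitOn (cs : List Char) :
    PySem.Chars.splitOn cs ['\n'] = cs.splitOn '\n' := by
  show PySem.Chars.splitOn.go ['\n'] (cs.length + 1) cs [] [] = _
  rw [pv_go_splitOn _ _ _ _ (by omega)]
  obtain ⟨h0, t0, ht⟩ := List.exists_cons_of_ne_nil (List.splitOnP_ne_nil (· == '\n') cs)
  rw [show List.splitOn '\n' cs = List.splitOnP (· == '\n') cs from rfl, ht]
  simp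

theorem pv_splitOn_no_sep : ∀ {cs : List Char}, '\n' ∉ cs → cs.splitOn '\n' = [cs] := by
  intro cs
  induction cs with
  | nil => intro _; rfl
  | cons c rest ih =>
    intro h
    rw [show List.splitOn '\n' (c :: rest) = List.splitOnP (· == '\n') (c :: rest) from rfl,
        List.splitOnP_cons, if_neg (by simp; rintro rfl; exact h (List.mem_cons_self))]
    rw [show List.splitOnP (· == '\n') rest = List.splitOn '\n' rest from rfl,
        ih (fun hm => h (List.mem_cons_of_mem _ hm))]
    rfl

theorem pv_splitOn_cons : ∀ {p : List Char} (rest : List Char), '\n' ∉ p →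
    (p ++ '\n' :: rest).splitOn '\n' = p :: rest.splitOn '\n' := by
  intro p
  induction p with
  | nil =>
    intro rest _
    rw [List.nil_append, show List.splitOn '\n' ('\n' :: rest) = List.splitOnP (· == '\n') ('\n' :: rest) from rfl,
        List.splitOnP_cons, if_pos (by simp)]
    rfl
  | cons c p' ih =>
    intro rest h
    have hc : c ≠ '\n' := fun hh => h (hh ▸ List.mem_cons_self)
    rw [List.cons_append, show List.splitOn '\n' (c :: (p' ++ '\n' :: rest)) = List.splitOnP (· == '\n') (c :: (p' ++ '\n' :: rest)) from rfl,
        List.splitOnP_cons, if_neg (by simp [hc])]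
    rw [show List.splitOnP (· == '\n') (p' ++ '\n' :: rest) = List.splitOn '\n' (p' ++ '\n' :: rest) from rfl,
        ih rest (fun hm => h (List.mem_cons_of_mem _ hm))]
    rfl

theorem pv_splitOn_nl_cons (X : List Char) : ('\n' :: X).splitOn '\n' = [] :: X.splitOn '\n' := by
  rw [show List.splitOn '\n' ('\n' :: X) = List.splitOnP (· == '\n') ('\n' :: X) from rfl,
      List.splitOnP_cons, if_pos (by simp)]
  rfl

theorem pv_splitOn_last {P L : List Char} (h : '\n' ∉ L) :
    (P ++ '\n' :: L).splitOn '\n' = P.splitOn '\n' ++ [L] := by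
  induction P with
  | nil => rw [List.nil_append, pv_splitOn_nl_cons L, pv_splitOn_no_sep h]; rfl
  | cons c P' ih =>
    by_cases hc : c = '\n'
    · subst hc
      rw [List.cons_append, pv_splitOn_nl_cons (P' ++ '\n' :: L), ih, pv_splitOn_nl_cons P']
      rfl
    · rw [List.cons_append,
          show List.splitOn '\n' (c :: (P' ++ '\n' :: L)) = List.splitOnP (· == '\n') (c :: (P' ++ '\n' :: L)) from rfl,
          List.splitOnP_cons, if_neg (by simp [hc]),
          show List.splitOnP (· == '\n') (P' ++ '\n' :: L) = List.splitOn '\n' (P' ++ '\n' :: L) from rfl, ih,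
          show List.splitOn '\n' (c :: P') = List.splitOnP (· == '\n') (c :: P') from rfl,
          List.splitOnP_cons, if_neg (by simp [hc]),
          show List.splitOnP (· == '\n') P' = List.splitOn '\n' P' from rfl]
      obtain ⟨h0, t0, ht⟩ := List.exists_cons_of_ne_nil (List.splitOnP_ne_nil (· == '\n') P')
      rw [show List.splitOn '\n' P' = List.splitOnP (· == '\n') P' from rfl, ht]
      rfl

theorem pv_rgo_pin {s sub : List Char} : ∀ (j k : Nat), k ≤ j → sub <+: s.drop k →
    (∀ i, k < i → i ≤ j → ¬ sub <+: s.drop i) →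
    PySem.Chars.rfind.go s sub j = (k : Int) := by
  intro j
  induction j with
  | zero =>
    intro k hk hp _
    interval_cases k
    show (if sub.isPrefixOf s then (0 : Int) else -1) = 0
    rw [if_pos (List.isPrefixOf_iff_prefix.mpr (by simpa using hp))]
  | succ j ih =>
    intro k hk hp hmax
    show (if sub.isPrefixOf (s.drop (j + 1)) then ((j : Int) + 1) else PySem.Chars.rfind.go s sub j) = _
    by_cases hkj : k = j + 1
    · subst hkj
      rw [if_pos (List.isPrefixOf_iff_prefix.mpr hp)]
      push_cast; ring
    · have hk' : k ≤ j := by omega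
      rw [if_neg (by
        intro hpre
        exact hmax (j + 1) (by omega) le_rfl (List.isPrefixOf_iff_prefix.mp hpre))]
      exact ih k hk' hp (fun i h1 h2 => hmax i h1 (by omega))

theorem pv_rgo_neg {s sub : List Char} : ∀ (j : Nat),
    (∀ i, i ≤ j → ¬ sub <+: s.drop i) →
    PySem.Chars.rfind.go s sub j = -1 := by
  intro j
  induction j with
  | zero =>
    intro h
    show (if sub.isPrefixOf s then (0 : Int) else -1) = -1
    rw [if_neg (fun hpre => h 0 le_rfl (by simpa using List.isPrefixOf_iff_prefix.mp hpre))]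
  | succ j ih =>
    intro h
    show (if sub.isPrefixOf (s.drop (j + 1)) then ((j : Int) + 1) else PySem.Chars.rfind.go s sub j) = _
    rw [if_neg (fun hpre => h (j + 1) le_rfl (List.isPrefixOf_iff_prefix.mp hpre))]
    exact ih (fun i hi => h i (by omega))

theorem pv_rfind_pin {s sub : List Char} {k : Nat} (hk : k ≤ s.length)
    (h : sub <+: s.drop k) (hmax : ∀ i, k < i → ¬ sub <+: s.drop i) :
    PySem.Chars.rfind s sub = (k : Int) :=
  pv_rgo_pin s.length k hk h (fun i h1 _ => hmax i h1)

theorem pv_rfind_neg {s sub : List Char}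
    (h : ∀ i, ¬ sub <+: s.drop i) : PySem.Chars.rfind s sub = -1 :=
  pv_rgo_neg s.length (fun i _ => h i)

theorem pv_rfind_isIn {s sub : List Char} (hne : sub ≠ [])
    (h : PySem.Chars.isIn sub s = true) :
    ∃ k : Nat, PySem.Chars.rfind s sub = (k : Int) ∧ k ≤ s.length ∧
      sub <+: s.drop k ∧ ∀ i, k < i → ¬ sub <+: s.drop i := by
  obtain ⟨j, hj⟩ := (PySem.Chars.exists_prefix_drop_iff_isIn sub s).mpr h
  have hjlen : j ≤ s.length := by
    by_contra hlt
    rw [List.drop_eq_nil_of_le (by omega)] at hj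
    exact hne (List.prefix_nil.mp hj)
  have hg : sub <+: s.drop (Nat.findGreatest (fun i => sub <+: s.drop i) s.length) :=
    Nat.findGreatest_spec (P := fun i => sub <+: s.drop i) hjlen hj
  have hmax : ∀ i, Nat.findGreatest (fun i => sub <+: s.drop i) s.length < i →
      ¬ sub <+: s.drop i := by
    intro i h1 hpre
    by_cases hi : i ≤ s.length
    · exact Nat.findGreatest_is_greatest (P := fun i => sub <+: s.drop i) h1 hi hpre
    · rw [List.drop_eq_nil_of_le (by omega)] at hpre
      exact hne (List.prefix_nil.mp hpre)
  exact ⟨_, pv_rfind_pin (Nat.findGreatest_le _) hg hmax, Nat.findGreatest_le _, hg, hmax⟩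

theorem pv_find_pin {s sub : List Char} {m : Nat} (h : sub <+: s.drop m)
    (hmin : ∀ i, i < m → ¬ sub <+: s.drop i) : PySem.Chars.find s sub = (m : Int) := by
  have hnn : 0 ≤ PySem.Chars.find s sub := by
    rw [PySem.Chars.find_nonneg_iff]
    exact (List.infix_iff_prefix_suffix.mpr ⟨_, h, List.drop_suffix _ _⟩)
  obtain ⟨hpre, hmin'⟩ := PySem.Chars.find_spec hnn
  set t := (PySem.Chars.find s sub).toNat with ht
  have : t = m := by
    rcases Nat.lt_trichotomy t m with hlt | heq | hgt
    · exact absurd hpre (hmin t hlt)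
    · exact heq
    · exact absurd h (hmin' m hgt)
  omega

theorem pv_occ_split {p rest sub : List Char} {i : Nat} (hnl : '\n' ∉ sub)
    (h : sub <+: (p ++ '\n' :: rest).drop i) :
    sub <+: p.drop i ∨ (p.length + 1 ≤ i ∧ sub <+: rest.drop (i - (p.length + 1))) := by
  by_cases hi : i ≤ p.length
  · left
    rw [List.drop_append_of_le_length hi] at h
    by_cases hlen : sub.length ≤ (p.drop i).length
    · have := List.prefix_iff_eq_take.mp h
      rw [List.take_append_of_le_length hlen] at this
      rw [this]
      exact List.take_prefix _ _
    · exfalso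
      obtain ⟨t, ht⟩ := h
      have hget : (sub ++ t)[(p.drop i).length]? = some '\n' := by
        rw [ht, List.getElem?_append_right le_rfl]
        simp
      rw [List.getElem?_append_left (by omega)] at hget
      exact hnl (List.mem_of_getElem? hget)
  · right
    refine ⟨by omega, ?_⟩
    have : (p ++ '\n' :: rest).drop i = rest.drop (i - (p.length + 1)) := by
      rw [List.drop_append]
      rw [List.drop_eq_nil_of_le (by omega), List.nil_append]
      rw [show i - p.length = (i - p.length - 1) + 1 by omega]
      rw [List.drop_succ_cons, show i - p.length - 1 = i - (p.length + 1) from by omega]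
    rwa [this] at h

theorem pv_first_line {cs : List Char} (h : '\n' ∈ cs) :
    ∃ p rest, cs = p ++ '\n' :: rest ∧ '\n' ∉ p := by
  have hne : cs.dropWhile (· != '\n') ≠ [] := by
    intro hnil
    have := List.dropWhile_eq_nil_iff.mp hnil '\n' h
    simp at this
  refine ⟨cs.takeWhile (· != '\n'), (cs.dropWhile (· != '\n')).tail, ?_, ?_⟩
  · conv_lhs => rw [← List.takeWhile_append_dropWhile (p := (· != '\n')) (l := cs)]
    congr 1
    have hh := List.head_dropWhile_not (· != '\n') hne
    have hhead : (cs.dropWhile (· != '\n')).head hne = '\n' := by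
      simpa using hh
    conv_lhs => rw [← List.cons_head_tail hne, hhead]
  · intro hm
    have := List.mem_takeWhile_imp hm
    simp at this

theorem pv_isIn_append {p rest sub : List Char} (hne : sub ≠ []) (hnl : '\n' ∉ sub) :
    PySem.Chars.isIn sub (p ++ '\n' :: rest)
      = (PySem.Chars.isIn sub p || PySem.Chars.isIn sub rest) := by
  by_cases h : PySem.Chars.isIn sub (p ++ '\n' :: rest) = true
  · rw [h]
    obtain ⟨j, hj⟩ := (PySem.Chars.exists_prefix_drop_iff_isIn sub _).mpr h
    rcases pv_occ_split hnl hj with hp | ⟨_, hr⟩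
    · rw [(PySem.Chars.exists_prefix_drop_iff_isIn sub p).mp ⟨j, hp⟩, Bool.true_or]
    · rw [(PySem.Chars.exists_prefix_drop_iff_isIn sub rest).mp ⟨_, hr⟩, Bool.or_true]
  · rw [Bool.eq_false_iff.mpr h]
    have hnp : PySem.Chars.isIn sub p = false := by
      rw [Bool.eq_false_iff, Ne, ← PySem.Chars.exists_prefix_drop_iff_isIn]
      rw [← PySem.Chars.exists_prefix_drop_iff_isIn] at h
      intro ⟨j, hj⟩
      have hjlen : j ≤ p.length := by
        by_contra hgt
        rw [List.drop_eq_nil_of_le (by omega)] at hj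
        exact hne (List.prefix_nil.mp hj)
      refine h ⟨j, ?_⟩
      rw [List.drop_append_of_le_length hjlen]
      exact hj.trans (List.prefix_append _ _)
    have hnr : PySem.Chars.isIn sub rest = false := by
      rw [Bool.eq_false_iff, Ne, ← PySem.Chars.exists_prefix_drop_iff_isIn]
      rw [← PySem.Chars.exists_prefix_drop_iff_isIn] at h
      intro ⟨j, hj⟩
      refine h ⟨p.length + 1 + j, ?_⟩
      rw [List.drop_append, List.drop_eq_nil_of_le (by omega), List.nil_append,
          show p.length + 1 + j - p.length = j + 1 from by omega, List.drop_succ_cons]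
      exact hj
    rw [hnp, hnr]
    rfl

theorem pv_anyline (sub : List Char) (hne : sub ≠ []) (hnl : '\n' ∉ sub) :
    ∀ cs : List Char,
      (cs.splitOn '\n').any (fun l => PySem.Chars.isIn sub l) = PySem.Chars.isIn sub cs := by
  intro cs
  generalize hn : cs.length = n
  induction n using Nat.strong_induction_on generalizing cs with
  | _ n ih =>
    by_cases h : '\n' ∈ cs
    · obtain ⟨p, rest, hcs, hp⟩ := pv_first_line h
      subst hcs
      rw [pv_splitOn_cons rest hp, pv_isIn_append hne hnl, List.any_cons]
      congr 1
      exact ih rest.length (by simp at hn; omega) rest rfl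
    · rw [pv_splitOn_no_sep h]
      simp

def pvLastHit (hit : List Char → Bool) : List (List Char) → Nat
  | [] => 0
  | _ :: rest => if rest.any hit then pvLastHit hit rest + 1 else 0

theorem pv_foldE (hit : List Char → Bool) : ∀ (ls : List (List Char)) (n a : Int),
    (PySem.List.enumerate ls n).foldl (fun acc p => if hit p.2 then p.1 else acc) a
      = if ls.any hit then n + (pvLastHit hit ls : Int) else a := by
  intro ls
  induction ls with
  | nil => intro n a; simp [PySem.List.enumerate_nil]
  | cons x rest ih =>
    intro n a
    rw [PySem.List.enumerate_cons, List.foldl_cons, ih]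
    by_cases hr : rest.any hit
    · simp only [List.any_cons, hr, Bool.or_true, if_pos, pvLastHit]
      push_cast; ring_nf
    · by_cases hx : hit x
      · simp [pvLastHit, hr, hx]
      · simp [hr, hx]

theorem pv_drop_shift (p rest : List Char) (j : Nat) :
    (p ++ '\n' :: rest).drop (p.length + 1 + j) = rest.drop j := by
  rw [List.drop_append, List.drop_eq_nil_of_le (by omega), List.nil_append,
      show p.length + 1 + j - p.length = j + 1 from by omega, List.drop_succ_cons]

theorem pv_take_shift (p rest : List Char) (j : Nat) :
    (p ++ '\n' :: rest).take (p.length + 1 + j) = p ++ '\n' :: rest.take j := by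
  rw [List.take_append, List.take_of_length_le (by omega),
      show p.length + 1 + j - p.length = j + 1 from by omega, List.take_succ_cons]

theorem pv_inter_cons (p : List Char) {X : List (List Char)} (h : X ≠ []) :
    ['\n'].intercalate (p :: X) = p ++ '\n' :: ['\n'].intercalate X := by
  obtain ⟨q, r, rfl⟩ := List.exists_cons_of_ne_nil h
  have := PySem.Chars.join_cons_cons ['\n'] p q r
  simp only [PySem.Chars.join] at this
  simpa using this

theorem pv_findFrom_cases {cs : List Char} {k : Nat} (hk : k ≤ cs.length) :
    (PySem.Chars.findFrom cs ['\n'] (k : Int) = -1 ∧ PySem.Chars.find (cs.drop k) ['\n'] = -1)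
    ∨ (∃ f : Nat, PySem.Chars.find (cs.drop k) ['\n'] = (f : Int) ∧
        PySem.Chars.findFrom cs ['\n'] (k : Int) = ((k + f : Nat) : Int)) := by
  rw [PySem.Chars.findFrom_natCast cs ['\n'] k hk]
  by_cases hf : PySem.Chars.find (cs.drop k) ['\n'] = -1
  · left; rw [if_pos hf]; exact ⟨rfl, hf⟩
  · right
    have h1 := PySem.Chars.neg_one_le_find (cs.drop k) ['\n']
    refine ⟨(PySem.Chars.find (cs.drop k) ['\n']).toNat, ?_, ?_⟩
    · omega
    · rw [if_neg hf]; push_cast; omega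

theorem pv_take_ne_nil {α : Type} (m : Nat) {X : List α} (h : X ≠ []) : X.take (m + 1) ≠ [] := by
  cases X with
  | nil => exact absurd rfl h
  | cons a t => simp

theorem pv_dnli_main (sub : List Char) (hne : sub ≠ []) (hnl : '\n' ∉ sub) :
    ∀ cs : List Char, PySem.Chars.isIn sub cs = true →
    (∃ m : Nat, PySem.Chars.findFrom cs ['\n'] (PySem.Chars.rfind cs sub) = (m : Int) ∧
      ['\n'].intercalate ((cs.splitOn '\n').take (pvLastHit (fun l => PySem.Chars.isIn sub l) (cs.splitOn '\n') + 1)) = cs.take m ∧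
      ['\n'].intercalate ((cs.splitOn '\n').drop (pvLastHit (fun l => PySem.Chars.isIn sub l) (cs.splitOn '\n') + 1)) = cs.drop (m + 1))
    ∨ (PySem.Chars.findFrom cs ['\n'] (PySem.Chars.rfind cs sub) = -1 ∧
      ['\n'].intercalate ((cs.splitOn '\n').take (pvLastHit (fun l => PySem.Chars.isIn sub l) (cs.splitOn '\n') + 1)) = cs ∧
      ['\n'].intercalate ((cs.splitOn '\n').drop (pvLastHit (fun l => PySem.Chars.isIn sub l) (cs.splitOn '\n') + 1)) = []) := by
  intro cs
  generalize hlen : cs.length = n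
  induction n using Nat.strong_induction_on generalizing cs with
  | _ n ih =>
  intro hin
  by_cases hmem : '\n' ∈ cs
  · obtain ⟨p, rest, hcs, hp⟩ := pv_first_line hmem
    subst hcs
    have hlenp : (p ++ '\n' :: rest).length = p.length + 1 + rest.length := by
      simp; omega
    have hns' := List.splitOnP_ne_nil (· == '\n') rest
    have hns'' : rest.splitOn '\n' ≠ [] := hns'
    rw [pv_splitOn_cons rest hp]
    by_cases hr : PySem.Chars.isIn sub rest = true
    · -- last hit is in rest
      have hany : (rest.splitOn '\n').any (fun l => PySem.Chars.isIn sub l) = true := by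
        rw [pv_anyline sub hne hnl rest]; exact hr
      have hLH : pvLastHit (fun l => PySem.Chars.isIn sub l) (p :: rest.splitOn '\n')
          = pvLastHit (fun l => PySem.Chars.isIn sub l) (rest.splitOn '\n') + 1 := by
        simp [pvLastHit, hany]
      set LHr := pvLastHit (fun l => PySem.Chars.isIn sub l) (rest.splitOn '\n') with hLHr
      -- rfind shifts
      obtain ⟨k, hkeq, hklen, hkpre, hkmax⟩ := pv_rfind_isIn hne hr
      have hrf : PySem.Chars.rfind (p ++ '\n' :: rest) sub = ((p.length + 1 + k : Nat) : Int) := by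
        apply pv_rfind_pin (by omega)
        · rw [pv_drop_shift]; exact hkpre
        · intro i hi hpre
          rcases pv_occ_split hnl hpre with hip | ⟨hge, hir⟩
          · rw [List.drop_eq_nil_of_le (by omega)] at hip
            exact hne (List.prefix_nil.mp hip)
          · exact hkmax _ (by omega) hir
      have hrfr : PySem.Chars.rfind rest sub = (k : Int) := hkeq
      have hdropk : (p ++ '\n' :: rest).drop (p.length + 1 + k) = rest.drop k :=
        pv_drop_shift p rest k
      -- take/drop of the cons list
      have htake1 : ∀ m : Nat, (p :: rest.splitOn '\n').take (m + 1 + 1)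
          = p :: (rest.splitOn '\n').take (m + 1) := by intro m; rfl
      rcases ih rest.length (by omega) rest rfl hr with
        ⟨m, hmeq, hA1, hA2⟩ | ⟨hmeq, hA1, hA2⟩
      · -- newline after the hit inside rest
        rw [hrfr] at hmeq
        rcases pv_findFrom_cases (cs := rest) (k := k) hklen with ⟨hcon, _⟩ | ⟨f, hfind, heq2⟩
        · rw [hcon] at hmeq; omega
        · have hmkf : m = k + f := by rw [heq2] at hmeq; exact_mod_cast hmeq.symm
          left
          refine ⟨p.length + 1 + m, ?_, ?_, ?_⟩
          · rw [hrf]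
            rcases pv_findFrom_cases (cs := p ++ '\n' :: rest) (k := p.length + 1 + k)
              (by omega) with ⟨_, hcon⟩ | ⟨f', hfind', heq2'⟩
            · rw [hdropk, hfind] at hcon; omega
            · rw [hdropk, hfind] at hfind'
              have : f' = f := by exact_mod_cast hfind'.symm
              subst this
              rw [heq2']
              congr 1
              omega
          · rw [hLH, htake1, pv_inter_cons _ (pv_take_ne_nil _ hns''), hA1,
              show p.length + 1 + m = p.length + 1 + m from rfl]
            rw [pv_take_shift]
          · rw [hLH, List.drop_succ_cons, hA2,
              show p.length + 1 + m + 1 = p.length + 1 + (m + 1) from by omega]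
            rw [pv_drop_shift]
      · -- no newline after the hit inside rest
        rw [hrfr] at hmeq
        rcases pv_findFrom_cases (cs := rest) (k := k) hklen with ⟨_, hcon⟩ | ⟨f, hfind, heq2⟩
        · right
          refine ⟨?_, ?_, ?_⟩
          · rw [hrf]
            rcases pv_findFrom_cases (cs := p ++ '\n' :: rest) (k := p.length + 1 + k)
              (by omega) with ⟨hv, _⟩ | ⟨f', hfind', _⟩
            · exact hv
            · rw [hdropk, hcon] at hfind'; omega
          · rw [hLH, htake1, pv_inter_cons _ (pv_take_ne_nil _ hns''), hA1]
          · rw [hLH, List.drop_succ_cons, hA2]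
        · rw [heq2] at hmeq; omega
    · -- last hit is line p itself
      have hany : (rest.splitOn '\n').any (fun l => PySem.Chars.isIn sub l) = false := by
        rw [pv_anyline sub hne hnl rest]
        exact Bool.eq_false_iff.mpr hr
      have hLH : pvLastHit (fun l => PySem.Chars.isIn sub l) (p :: rest.splitOn '\n') = 0 := by
        simp [pvLastHit, hany]
      obtain ⟨k, hkeq, hklen, hkpre, hkmax⟩ := pv_rfind_isIn hne hin
      have hkp : sub <+: p.drop k := by
        rcases pv_occ_split hnl hkpre with hip | ⟨_, hir⟩
        · exact hip
        · exact absurd ((PySem.Chars.exists_prefix_drop_iff_isIn sub rest).mp ⟨_, hir⟩) hr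
      have hkplen : k + sub.length ≤ p.length := by
        have h1 := hkp.length_le
        rw [List.length_drop] at h1
        by_cases hkle : k ≤ p.length
        · omega
        · rw [List.drop_eq_nil_of_le (by omega)] at hkp
          exact absurd (List.prefix_nil.mp hkp) hne
      have hsubpos : 0 < sub.length := List.length_pos_iff.mpr hne
      have hdk : (p ++ '\n' :: rest).drop k = p.drop k ++ '\n' :: rest :=
        List.drop_append_of_le_length (by omega)
      have hfind : PySem.Chars.find ((p ++ '\n' :: rest).drop k) ['\n']
          = ((p.length - k : Nat) : Int) := by
        apply pv_find_pin
        · rw [hdk, List.drop_append, List.drop_eq_nil_of_le (by rw [List.length_drop]),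
              List.nil_append, List.length_drop,
              show p.length - k - (p.length - k) = 0 from by omega, List.drop_zero]
          exact ⟨rest, rfl⟩
        · intro i hilt hpre
          rw [pv_single_prefix_drop] at hpre
          rw [hdk, List.getElem?_append_left (by rw [List.length_drop]; omega),
              List.getElem?_drop] at hpre
          exact hp (List.mem_of_getElem? hpre)
      left
      refine ⟨p.length, ?_, ?_, ?_⟩
      · rw [hkeq]
        rcases pv_findFrom_cases (cs := p ++ '\n' :: rest) (k := k) (by omega) with
          ⟨_, hcon⟩ | ⟨f, hfind', heq2⟩
        · rw [hfind] at hcon; omega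
        · rw [hfind] at hfind'
          have : f = p.length - k := by exact_mod_cast hfind'.symm
          subst this
          rw [heq2]
          congr 1
          omega
      · rw [hLH]
        show ['\n'].intercalate [p] = _
        rw [show ['\n'].intercalate [p] = p from by simp [List.intercalate],
            List.take_left]
      · rw [hLH, List.drop_succ_cons, List.drop_zero, List.intercalate_splitOn,
            show p.length + 1 = p.length + 1 + 0 from by omega, pv_drop_shift, List.drop_zero]
  · -- no newline at all
    rw [pv_splitOn_no_sep hmem]
    right
    obtain ⟨k, hkeq, hklen, _, _⟩ := pv_rfind_isIn hne hin
    refine ⟨?_, ?_, ?_⟩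
    · rw [hkeq]
      rcases pv_findFrom_cases (cs := cs) (k := k) hklen with ⟨hv, _⟩ | ⟨f, hfind, _⟩
      · exact hv
      · exfalso
        have : 0 ≤ PySem.Chars.find (cs.drop k) ['\n'] := by rw [hfind]; omega
        rw [PySem.Chars.find_nonneg_iff] at this
        obtain ⟨j, hj⟩ := (PySem.Chars.exists_prefix_drop_iff_isIn ['\n'] (cs.drop k)).mpr
          ((PySem.Chars.isIn_iff_infix _ _).mpr this)
        rw [pv_single_prefix_drop, List.getElem?_drop] at hj
        exact hmem (List.mem_of_mem_drop (List.mem_of_getElem? (by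
          rw [List.getElem?_drop]; exact hj)))
    · simp [pvLastHit, List.intercalate]
    · simp [pvLastHit, List.intercalate]

theorem pv_conv_main (cs : List Char) :
    (∃ m : Nat, PySem.Chars.rfind cs ['\n'] = (m : Int) ∧
      ['\n'].intercalate ((cs.splitOn '\n').dropLast) = cs.take m ∧
      (cs.splitOn '\n').getLast? = some (cs.drop (m + 1)))
    ∨ (PySem.Chars.rfind cs ['\n'] = -1 ∧
      ['\n'].intercalate ((cs.splitOn '\n').dropLast) = [] ∧
      (cs.splitOn '\n').getLast? = some cs) := by
  by_cases hmem : '\n' ∈ cs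
  · left
    have hex : ∃ i, i ≤ cs.length ∧ cs[i]? = some '\n' := by
      obtain ⟨i, hi, hget⟩ := List.getElem_of_mem hmem
      exact ⟨i, by omega, by rw [List.getElem?_eq_getElem hi]; rw [hget]⟩
    obtain ⟨i0, hi0le, hi0⟩ := hex
    have hkget : cs[Nat.findGreatest (fun i => cs[i]? = some '\n') cs.length]? = some '\n' :=
      Nat.findGreatest_spec (P := fun i => cs[i]? = some '\n') hi0le hi0
    set k := Nat.findGreatest (fun i => cs[i]? = some '\n') cs.length with hk
    have hklt : k < cs.length := by
      by_contra hge
      rw [List.getElem?_eq_none_iff.mpr (by omega)] at hkget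
      simp at hkget
    have hdecomp : cs = cs.take k ++ '\n' :: cs.drop (k + 1) := by
      conv_lhs => rw [← List.take_append_drop k cs]
      congr 1
      rw [List.drop_eq_getElem_cons hklt]
      congr 1
      have := List.getElem?_eq_getElem hklt
      rw [this] at hkget
      exact (Option.some.injEq _ _ ▸ hkget :)
    have hnoL : '\n' ∉ cs.drop (k + 1) := by
      intro hm
      obtain ⟨j, hj, hget⟩ := List.getElem_of_mem hm
      rw [List.getElem_drop] at hget
      rw [List.length_drop] at hj
      have hgt : cs[k + 1 + j]? = some '\n' := by
        rw [List.getElem?_eq_getElem (by omega)]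
        rw [hget]
      exact Nat.findGreatest_is_greatest (P := fun i => cs[i]? = some '\n')
        (n := cs.length) (by omega) (by omega) hgt
    refine ⟨k, ?_, ?_, ?_⟩
    · apply pv_rfind_pin (by omega)
      · rw [pv_single_prefix_drop]; exact hkget
      · intro i hi hpre
        rw [pv_single_prefix_drop] at hpre
        by_cases hile : i ≤ cs.length
        · exact Nat.findGreatest_is_greatest (P := fun i => cs[i]? = some '\n') hi hile hpre
        · rw [List.getElem?_eq_none_iff.mpr (by omega)] at hpre
          simp at hpre
    · conv_lhs => rw [hdecomp]
      rw [pv_splitOn_last hnoL, List.dropLast_concat, List.intercalate_splitOn]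
    · conv_lhs => rw [hdecomp]
      rw [pv_splitOn_last hnoL, List.getLast?_concat]
  · right
    refine ⟨?_, ?_, ?_⟩
    · apply pv_rfind_neg
      intro i hpre
      rw [pv_single_prefix_drop] at hpre
      exact hmem (List.mem_of_getElem? hpre)
    · rw [pv_splitOn_no_sep hmem]; rfl
    · rw [pv_splitOn_no_sep hmem]; rfl

theorem pv_str_ext {s t : String} (h : s.toList = t.toList) : s = t := by
  rw [← String.ofList_toList (s := s), h, String.ofList_toList]

theorem pv_pyGet_neg_one {α : Type} (xs : List α) (h : xs ≠ []) :
    PySem.List.pyGet? xs (-1) = xs.getLast? := by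
  have hpos : 1 ≤ xs.length := List.length_pos_iff.mpr h
  rw [List.getLast?_eq_getElem?]
  simp only [PySem.List.pyGet?, PySem.List.pyIdx?]
  rw [if_neg (by omega), if_pos (by exact_mod_cast by omega : -(xs.length : Int) ≤ -1)]
  simp

theorem pv_enum_map {α β : Type} (f : α → β) : ∀ (l : List α) (n : Int),
    PySem.List.enumerate (l.map f) n = (PySem.List.enumerate l n).map (fun q => (q.1, f q.2)) := by
  intro l
  induction l with
  | nil => intro n; simp [PySem.List.enumerate_nil]
  | cons x rest ih => intro n; rw [List.map_cons, PySem.List.enumerate_cons,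
      PySem.List.enumerate_cons, List.map_cons, ih]

theorem pv_texts (text : String) :
    (PySem.Str.split? text "\n").getD [] = (text.toList.splitOn '\n').map String.ofList := by
  show (Option.map (List.map String.ofList) (PySem.Chars.split? text.toList ['\n'])).getD [] = _
  rw [show PySem.Chars.split? text.toList ['\n']
      = some (PySem.Chars.splitOn text.toList ['\n']) from by simp [PySem.Chars.split?]]
  rw [pv_chars_splitOn]
  rfl

theorem pv_join_map (X : List (List Char)) :
    (PySem.Str.join "\n" (X.map String.ofList)).toList = ['\n'].intercalate X := by
  rw [PySem.Str.toList_join]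
  simp only [List.map_map]
  rw [show (String.toList ∘ String.ofList) = id from funext (fun l => String.toList_ofList)]
  simp [PySem.Chars.join]

-- ===== VERDICT (by name: the statement is the Claim_ definition above) =====
theorem split_persona_and_context_py_spec : Claim_equal_split_persona_and_context_py := by
  intro text eval_type _ hpre
  unfold Spec_split_persona_and_context_py
  unfold split_persona_and_context_py split_persona_and_context_py_alt
  by_cases hin : PySem.Str.isIn "your persona:" text = false
  · rw [if_pos hin, if_pos hin]
  · rw [if_neg hin, if_neg hin]
    have hin' : PySem.Chars.isIn ("your persona:".toList) text.toList = true := by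
      rw [← PySem.Str.isIn_eq]
      exact Bool.of_not_eq_false hin
    have hne : ("your persona:".toList : List Char) ≠ [] := by decide
    have hnl : '\n' ∉ ("your persona:".toList : List Char) := by decide
    rcases hpre with hpre | hpre | hpre
    · exact absurd hpre hin
    · -- convai2
      subst hpre
      rw [if_pos rfl, if_pos rfl]
      simp only
      rw [pv_texts]
      have hnsne : text.toList.splitOn '\n' ≠ [] := List.splitOnP_ne_nil _ _
      rw [PySem.List.slice_to_neg_one, ← List.map_dropLast,
          pv_pyGet_neg_one _ (by simpa using hnsne), List.getLast?_map]
      rw [show PySem.Str.rfind text "\n" = PySem.Chars.rfind text.toList ['\n'] from rfl]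
      rcases pv_conv_main text.toList with ⟨m, hrf, hA1, hA2⟩ | ⟨hrf, hA1, hA2⟩
      · rw [hrf, hA2, if_neg (by omega)]
        simp only [Option.map_some, Option.getD_some]
        refine Prod.ext ?_ ?_
        · show some _ = some _
          refine congrArg some (pv_str_ext ?_)
          rw [pv_join_map, hA1, PySem.Str.toList_slice, PySem.Chars.slice_eq_listSlice,
              PySem.List.slice_to_natCast]
        · refine pv_str_ext ?_
          rw [String.toList_ofList, PySem.Str.toList_slice, PySem.Chars.slice_eq_listSlice,
              show (m : Int) + 1 = ((m + 1 : Nat) : Int) from by push_cast; ring,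
              PySem.List.slice_from_natCast]
      · rw [hrf, if_pos rfl, hA2]
        simp only [Option.map_some, Option.getD_some]
        refine Prod.ext ?_ ?_
        · show some _ = some _
          refine congrArg some (pv_str_ext ?_)
          rw [pv_join_map, hA1]
          rfl
        · exact String.ofList_toList
    · -- dnli
      subst hpre
      rw [if_neg (show ¬ (("dnli" : String) = "convai2") from by decide), if_pos rfl,
          if_neg (show ¬ (("dnli" : String) = "convai2") from by decide)]
      simp only
      rw [pv_texts, pv_enum_map, List.foldl_map]
      have hhit : (fun (acc : Int) (q : Int × List Char) =>
          if PySem.Str.isIn "your persona:" (String.ofList q.2) then q.1 else acc)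
          = fun acc q => if PySem.Chars.isIn ("your persona:".toList) q.2 then q.1 else acc := by
        funext acc q
        simp
      rw [hhit]
      rw [pv_foldE]
      have hany : (text.toList.splitOn '\n').any (fun l => PySem.Chars.isIn "your persona:".toList l) = true := by
        rw [pv_anyline _ hne hnl]; exact hin'
      rw [if_pos hany, zero_add]
      rw [show ((pvLastHit (fun l => PySem.Chars.isIn "your persona:".toList l)
            (text.toList.splitOn '\n') : Nat) : Int) + 1
          = ((pvLastHit (fun l => PySem.Chars.isIn "your persona:".toList l)
            (text.toList.splitOn '\n') + 1 : Nat) : Int) from by push_cast; ring]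
      rw [PySem.List.slice_to_natCast, PySem.List.slice_from_natCast,
          ← List.map_take, ← List.map_drop]
      rw [show PySem.Str.findFrom text "\n" (PySem.Str.rfind text "your persona:")
          = PySem.Chars.findFrom text.toList ['\n'] (PySem.Chars.rfind text.toList "your persona:".toList) from rfl]
      rcases pv_dnli_main "your persona:".toList hne hnl text.toList hin' with
        ⟨m, hm, hA1, hA2⟩ | ⟨hm, hA1, hA2⟩
      · rw [hm, if_neg (by omega)]
        refine Prod.ext ?_ ?_
        · show some _ = some _
          refine congrArg some (pv_str_ext ?_)
          rw [pv_join_map, hA1, PySem.Str.toList_slice, PySem.Chars.slice_eq_listSlice,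
              PySem.List.slice_to_natCast]
        · refine pv_str_ext ?_
          rw [pv_join_map, hA2, PySem.Str.toList_slice, PySem.Chars.slice_eq_listSlice,
              show (m : Int) + 1 = ((m + 1 : Nat) : Int) from by push_cast; ring,
              PySem.List.slice_from_natCast]
      · rw [hm, if_pos rfl]
        refine Prod.ext ?_ ?_
        · show some _ = some _
          refine congrArg some (pv_str_ext ?_)
          rw [pv_join_map, hA1]
        · refine pv_str_ext ?_
          rw [pv_join_map, hA2]
          rfl
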